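-- pv_equiv track=rewrite | github.com/mihamerstan/bias_free_denoising | pyfiles/pyfiles/visualization_utils.py | get_jump_points
-- ===== SOURCE A (Python) =====
-- def get_jump_points(signal):
--     jump_points = [];
--     prev = signal[0];
--     for i in range(1, len(signal)):
--         if signal[i] != prev:
--             jump_points.append(i)
--             prev = signal[i]
--     return jump_points
-- ===== SOURCE B (Python) =====
-- def get_jump_points(sig):
--     # run-skipping two-pointer scan: jump over each run of equal values,
--     # recording the index where the next run starts
--     n = len(sig)
--     jumps = []
--     i = 0
--     while i < n:
--         j = i + 1
--         while j < n and sig[j] == sig[i]: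
--             j += 1
--         if j < n:
--             jumps.append(j)
--         i = j
--     return jumps
-- ===== Notes on version B (the rewrite author's own statement) =====
-- stated objective: alternative
-- what changed: B replaces A's element-by-element comparison with a tracked 'prev' value by a two-pointer run-skipping scan: an outer loop over runs and an inner loop that advances to the end of the current run, appending each run-start index.
import Mathlib
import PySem

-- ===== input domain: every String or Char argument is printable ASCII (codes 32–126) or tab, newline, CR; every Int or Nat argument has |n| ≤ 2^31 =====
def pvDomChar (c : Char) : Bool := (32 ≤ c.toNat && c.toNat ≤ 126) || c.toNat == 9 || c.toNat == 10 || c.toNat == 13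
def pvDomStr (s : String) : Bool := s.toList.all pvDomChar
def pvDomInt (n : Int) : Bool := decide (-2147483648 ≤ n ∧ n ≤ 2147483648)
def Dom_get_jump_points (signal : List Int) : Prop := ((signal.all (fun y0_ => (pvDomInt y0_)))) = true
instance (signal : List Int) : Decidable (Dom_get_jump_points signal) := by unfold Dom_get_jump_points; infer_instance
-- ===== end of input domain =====

-- B replaces A's prev-tracking change detector with a two-pointer run-skipping scan
-- (alternative decomposition, same O(n) cost); the empty list, on which A raises IndexError, is excluded by Pre_.

-- ===== PORT A =====
-- loop body of A's 'for i in range(1, len(signal))'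
def pvStepA (signal : List Int) (st : List Int × Int) (i : Int) : List Int × Int :=
  if PySem.List.pyGetD signal i 0 ≠ st.2 then (st.1 ++ [i], PySem.List.pyGetD signal i 0) else st

def get_jump_points (signal : List Int) : List Int :=
  match PySem.List.pyGet? signal 0 with
  | none => []   -- the first-element read raises IndexError on the empty list; excluded by Pre_
  | some prev =>
      ((PySem.List.pyRange 1 (signal.length : Int) 1).foldl (pvStepA signal) ([], prev)).1

-- ===== PORT B =====
-- inner while loop of B: advance j to the end of the run of value v
def pvSkipRun (signal : List Int) (v : Int) (j : Nat) : Nat :=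
  if _h : j < signal.length then
    if signal.getD j 0 = v then pvSkipRun signal v (j + 1) else j
  else j
termination_by signal.length - j

theorem pvSkipRun_ge (signal : List Int) (v : Int) (j : Nat) : j ≤ pvSkipRun signal v j := by
  unfold pvSkipRun
  split
  · split
    · have := pvSkipRun_ge signal v (j + 1); omega
    · exact le_refl j
  · exact le_refl j
termination_by signal.length - j

-- outer while loop of B over run starts
def pvOuter (signal : List Int) (i : Nat) (jumps : List Int) : List Int :=
  if _h : i < signal.length then
    let j := pvSkipRun signal (signal.getD i 0) (i + 1)
    pvOuter signal j (if j < signal.length then jumps ++ [(j : Int)] else jumps)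
  else jumps
termination_by signal.length - i
decreasing_by
  have := pvSkipRun_ge signal (signal.getD i 0) (i + 1); omega

def get_jump_points_alt (signal : List Int) : List Int := pvOuter signal 0 []

-- ===== PRECONDITION & SPEC =====
-- Pre_ excludes only the empty list, on which A raises IndexError reading the first element.
def Pre_get_jump_points (signal : List Int) : Prop := signal ≠ []
instance (signal : List Int) : Decidable (Pre_get_jump_points signal) := by unfold Pre_get_jump_points; infer_instance
def pvWitness_get_jump_points : List Int := [1, 1, 2]

def Spec_get_jump_points (signal : List Int) (out : List Int) : Prop := out = get_jump_points_alt signal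
instance (signal : List Int) (out : List Int) : Decidable (Spec_get_jump_points signal out) := by unfold Spec_get_jump_points; infer_instance

-- ===== CLAIM (what is proved, stated in full; the proofs are below) =====
def Claim_equal_get_jump_points : Prop := ∀ (signal : List Int), Dom_get_jump_points signal → Pre_get_jump_points signal → Spec_get_jump_points signal (get_jump_points signal)

-- ===== LEMMAS AND PROOFS =====

-- the change indices of signal at positions ≥ k (canonical description both ports meet)
def pvChg (signal : List Int) (k : Nat) : List Int :=
  if _h : k < signal.length then
    (if signal.getD k 0 ≠ signal.getD (k - 1) 0 then [(k : Int)] else []) ++ pvChg signal (k + 1)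
  else []
termination_by signal.length - k

theorem pvChg_pos (signal : List Int) (k : Nat) (h : k < signal.length) :
    pvChg signal k =
      (if signal.getD k 0 ≠ signal.getD (k - 1) 0 then [(k : Int)] else []) ++ pvChg signal (k + 1) := by
  rw [pvChg, dif_pos h]

theorem pvChg_neg (signal : List Int) (k : Nat) (h : ¬ k < signal.length) : pvChg signal k = [] := by
  rw [pvChg, dif_neg h]

theorem pvOuter_pos (signal : List Int) (i : Nat) (jumps : List Int) (h : i < signal.length) :
    pvOuter signal i jumps =
      pvOuter signal (pvSkipRun signal (signal.getD i 0) (i + 1))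
        (if pvSkipRun signal (signal.getD i 0) (i + 1) < signal.length
          then jumps ++ [(pvSkipRun signal (signal.getD i 0) (i + 1) : Int)] else jumps) := by
  rw [pvOuter, dif_pos h]

theorem pvOuter_neg (signal : List Int) (i : Nat) (jumps : List Int) (h : ¬ i < signal.length) :
    pvOuter signal i jumps = jumps := by
  rw [pvOuter, dif_neg h]

-- full characterisation of pvSkipRun
theorem pvSkipRun_spec (signal : List Int) (v : Int) (j0 : Nat) (h0 : j0 ≤ signal.length) :
    pvSkipRun signal v j0 ≤ signal.length ∧
    (∀ m, j0 ≤ m → m < pvSkipRun signal v j0 → signal.getD m 0 = v) ∧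
    (pvSkipRun signal v j0 < signal.length → signal.getD (pvSkipRun signal v j0) 0 ≠ v) := by
  unfold pvSkipRun
  split
  · rename_i hlt
    split
    · rename_i heq
      have ih := pvSkipRun_spec signal v (j0 + 1) (by omega)
      refine ⟨ih.1, ?_, ih.2.2⟩
      intro m hm1 hm2
      by_cases hmj : m = j0
      · subst hmj; exact heq
      · exact ih.2.1 m (by omega) hm2
    · rename_i hne
      exact ⟨by omega, fun m hm1 hm2 => by omega, fun _ => hne⟩
  · exact ⟨by omega, fun m hm1 hm2 => by omega, fun h => by omega⟩
termination_by signal.length - j0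

-- pvChg from any point inside a run equals the tail determined by the run's end
theorem pvChg_skip (signal : List Int) (i : Nat) (hi : i < signal.length) :
    ∀ s, i + 1 ≤ s → s ≤ pvSkipRun signal (signal.getD i 0) (i + 1) →
    pvChg signal s =
      (if pvSkipRun signal (signal.getD i 0) (i + 1) < signal.length
        then [(pvSkipRun signal (signal.getD i 0) (i + 1) : Int)] else []) ++
      pvChg signal (pvSkipRun signal (signal.getD i 0) (i + 1) + 1) := by
  obtain ⟨hjle, hrun, hend⟩ := pvSkipRun_spec signal (signal.getD i 0) (i + 1) (by omega)
  intro s hs1 hs2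
  induction hd : pvSkipRun signal (signal.getD i 0) (i + 1) - s generalizing s with
  | zero =>
    have hsj : s = pvSkipRun signal (signal.getD i 0) (i + 1) := by omega
    rw [← hsj]
    by_cases hjn : s < signal.length
    · have hprev : signal.getD (s - 1) 0 = signal.getD i 0 := by
        by_cases h1 : s - 1 = i
        · rw [h1]
        · exact hrun (s - 1) (by omega) (by omega)
      have hne : signal.getD s 0 ≠ signal.getD (s - 1) 0 := by
        rw [hprev, hsj]; exact hend (hsj ▸ hjn)
      rw [pvChg_pos signal s hjn, if_pos hne, if_pos hjn]
    · rw [pvChg_neg signal s hjn, if_neg hjn,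
        pvChg_neg signal (s + 1) (by omega), List.nil_append]
  | succ d ih =>
    have hsj : s < pvSkipRun signal (signal.getD i 0) (i + 1) := by omega
    have hsn : s < signal.length := by omega
    have hcur : signal.getD s 0 = signal.getD i 0 := hrun s (by omega) hsj
    have hprev : signal.getD (s - 1) 0 = signal.getD i 0 := by
      by_cases h1 : s - 1 = i
      · rw [h1]
      · exact hrun (s - 1) (by omega) (by omega)
    have heq : signal.getD s 0 = signal.getD (s - 1) 0 := by rw [hcur, hprev]
    rw [pvChg_pos signal s hsn, if_neg (not_not_intro heq), List.nil_append]
    exact ih (s + 1) (by omega) (by omega) (by omega)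

-- B computes jumps ++ pvChg from the next index
theorem pvOuter_eq (signal : List Int) (i : Nat) (jumps : List Int) (hi : i < signal.length) :
    pvOuter signal i jumps = jumps ++ pvChg signal (i + 1) := by
  have hij : i + 1 ≤ pvSkipRun signal (signal.getD i 0) (i + 1) :=
    pvSkipRun_ge signal (signal.getD i 0) (i + 1)
  have hskip := pvChg_skip signal i hi (i + 1) le_rfl hij
  rw [pvOuter_pos signal i jumps hi, hskip]
  by_cases hjn : pvSkipRun signal (signal.getD i 0) (i + 1) < signal.length
  · rw [if_pos hjn, if_pos hjn,
      pvOuter_eq signal (pvSkipRun signal (signal.getD i 0) (i + 1))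
        (jumps ++ [(pvSkipRun signal (signal.getD i 0) (i + 1) : Int)]) hjn]
    simp [List.append_assoc]
  · rw [if_neg hjn, if_neg hjn, pvOuter_neg signal _ jumps hjn, List.nil_append,
      pvChg_neg signal _ (by omega), List.append_nil]
termination_by signal.length - i
decreasing_by
  have := pvSkipRun_ge signal (signal.getD i 0) (i + 1); omega

-- A's fold computes acc ++ pvChg, with prev = signal[k-1] as loop invariant
theorem pvFoldA_eq (signal : List Int) (d : Nat) :
    ∀ k acc, 1 ≤ k → signal.length - k ≤ d →
    ((PySem.List.pyRange (k : Int) (signal.length : Int) 1).foldl (pvStepA signal)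
        (acc, signal.getD (k - 1) 0)).1 = acc ++ pvChg signal k := by
  induction d with
  | zero =>
    intro k acc hk hd
    have hempty : PySem.List.pyRange (k : Int) (signal.length : Int) 1 = [] := by
      rw [PySem.List.pyRange_one]
      have h0 : ((signal.length : Int) - (k : Int)).toNat = 0 := by omega
      rw [h0]; rfl
    rw [hempty, pvChg_neg signal k (by omega)]
    simp
  | succ d ih =>
    intro k acc hk hd
    by_cases hkn : k < signal.length
    · have hcons : PySem.List.pyRange (k : Int) (signal.length : Int) 1 =
          (k : Int) :: PySem.List.pyRange ((k : Int) + 1) (signal.length : Int) 1 :=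
        PySem.List.pyRange_one_cons (by exact_mod_cast hkn)
      rw [hcons]
      rw [List.foldl_cons]
      have hget : PySem.List.pyGetD signal (k : Int) 0 = signal.getD k 0 :=
        PySem.List.pyGetD_natCast signal k 0
      have hcast : ((k : Int) + 1) = ((k + 1 : Nat) : Int) := by push_cast; ring
      by_cases hch : signal.getD k 0 ≠ signal.getD (k - 1) 0
      · have hstep : pvStepA signal (acc, signal.getD (k - 1) 0) (k : Int) =
            (acc ++ [(k : Int)], signal.getD k 0) := by
          unfold pvStepA; rw [hget, if_pos hch]
        rw [hstep, hcast,
          show signal.getD k 0 = signal.getD ((k + 1) - 1) 0 from rfl,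
          ih (k + 1) (acc ++ [(k : Int)]) (by omega) (by omega),
          pvChg_pos signal k hkn, if_pos hch]
        simp [List.append_assoc]
      · have heq : signal.getD k 0 = signal.getD (k - 1) 0 := by
          by_contra hc; exact hch hc
        have hstep : pvStepA signal (acc, signal.getD (k - 1) 0) (k : Int) =
            (acc, signal.getD (k - 1) 0) := by
          unfold pvStepA; rw [hget, if_neg (not_not_intro heq)]
        rw [hstep, hcast,
          show signal.getD (k - 1) 0 = signal.getD ((k + 1) - 1) 0 from by
            rw [Nat.add_sub_cancel]; exact heq.symm,
          ih (k + 1) acc (by omega) (by omega),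
          pvChg_pos signal k hkn, if_neg (not_not_intro heq), List.nil_append]
    · have hempty : PySem.List.pyRange (k : Int) (signal.length : Int) 1 = [] := by
        rw [PySem.List.pyRange_one]
        have h0 : ((signal.length : Int) - (k : Int)).toNat = 0 := by omega
        rw [h0]; rfl
      rw [hempty, pvChg_neg signal k hkn]
      simp

-- ===== VERDICT (by name: the statement is the Claim_ definition above) =====
theorem get_jump_points_spec : Claim_equal_get_jump_points := by
  intro signal _hdom hpre
  unfold Spec_get_jump_points get_jump_points get_jump_points_alt
  obtain ⟨x, xs, rfl⟩ : ∃ x xs, signal = x :: xs := by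
    cases signal with
    | nil => exact absurd rfl hpre
    | cons x xs => exact ⟨x, xs, rfl⟩
  simp only [PySem.List.pyGet?_zero_cons]
  have hfold := pvFoldA_eq (x :: xs) (x :: xs).length 1 [] le_rfl (by omega)
  rw [Nat.cast_one, show ((x :: xs).getD (1 - 1) 0) = x from rfl, List.nil_append] at hfold
  rw [hfold, pvOuter_eq (x :: xs) 0 [] (by simp), List.nil_append]
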